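-- pv_equiv track=rewrite | github.com/officialsecondincommandofficer-byte/pharohs-tomb | Tools/export_minotaur_mazes.py | to_horizontal_vertical_walls
-- ===== SOURCE A (Python) =====
-- from typing import Iterable
--
-- Coord = tuple[int, int]
--
-- Edge = tuple[Coord, Coord]
--
-- def to_horizontal_vertical_walls(walls: Iterable[Edge]) -> tuple[list[Coord], list[Coord]]:
--     horizontal: list[Coord] = []
--     vertical: list[Coord] = []
--     for a, b in walls:
--         if a[0] != b[0]:
--             vertical.append((max(a[0], b[0]), a[1]))
--         else:
--             horizontal.append((a[0], max(a[1], b[1])))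
--
--     horizontal.sort(key=lambda item: (item[1], item[0]))
--     vertical.sort(key=lambda item: (item[1], item[0]))
--     return horizontal, vertical
-- ===== SOURCE B (Python) =====
-- from typing import Iterable
--
-- Coord = tuple[int, int]
-- Edge = tuple[Coord, Coord]
--
-- def to_horizontal_vertical_walls(walls):
--     # group-by-y bucket sort: dict y -> list of x, sort the y keys, sort each bucket
--     hb: dict = {}
--     vb: dict = {}
--     for a, b in walls:
--         if a[0] != b[0]:
--             vb.setdefault(a[1], []).append(max(a[0], b[0]))
--         else:
--             hb.setdefault(max(a[1], b[1]), []).append(a[0])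
--
--     def _emit(buckets):
--         out = []
--         for y in sorted(buckets):
--             for x in sorted(buckets[y]):
--                 out.append((x, y))
--         return out
--
--     return _emit(hb), _emit(vb)
-- ===== Notes on version B (the rewrite author's own statement) =====
-- stated objective: alternative
-- what changed: B replaces A's two comparison sorts over full coordinate tuples by a two-level grouping sort: one pass buckets each transformed wall into a dict keyed by its primary sort coordinate y (value = list of x), then the y keys are sorted and each bucket's x list is sorted, emitting (x, y) pairs bucket by bucket.
import Mathlib
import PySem

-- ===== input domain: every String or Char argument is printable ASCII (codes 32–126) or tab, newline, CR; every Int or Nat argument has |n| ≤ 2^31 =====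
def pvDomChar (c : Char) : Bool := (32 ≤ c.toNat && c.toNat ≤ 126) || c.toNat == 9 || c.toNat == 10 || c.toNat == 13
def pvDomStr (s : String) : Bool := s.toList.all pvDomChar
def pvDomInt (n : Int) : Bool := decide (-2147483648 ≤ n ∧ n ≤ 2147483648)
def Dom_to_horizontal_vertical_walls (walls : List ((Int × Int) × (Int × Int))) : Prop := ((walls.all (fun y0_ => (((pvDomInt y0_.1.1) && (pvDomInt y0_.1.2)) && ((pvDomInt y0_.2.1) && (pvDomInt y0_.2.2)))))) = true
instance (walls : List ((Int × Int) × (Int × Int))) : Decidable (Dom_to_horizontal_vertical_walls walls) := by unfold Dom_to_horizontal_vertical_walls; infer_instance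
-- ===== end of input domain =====

-- B replaces A's two comparison sorts over full tuples by a two-level grouping sort: bucket each
-- transformed wall into a dict keyed by its primary sort coordinate y, sort the keys, sort each
-- bucket of x's (objective: alternative algorithm, same asymptotic cost).

-- ===== PORT A =====
-- A: append each transformed edge to `horizontal` or `vertical`, then sort each list by key (item[1], item[0]).
def to_horizontal_vertical_walls (walls : List ((Int × Int) × (Int × Int))) : (List (Int × Int)) × (List (Int × Int)) :=
  let p := walls.foldl
    (fun (acc : List (Int × Int) × List (Int × Int)) ab =>
      let a := ab.1
      let b := ab.2
      if a.1 ≠ b.1 then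
        (acc.1, acc.2 ++ [(max a.1 b.1, a.2)])
      else
        (acc.1 ++ [(a.1, max a.2 b.2)], acc.2))
    ([], [])
  (PySem.List.sorted2 p.1 (fun item => item.2) (fun item => item.1),
   PySem.List.sorted2 p.2 (fun item => item.2) (fun item => item.1))

-- ===== PORT B =====
-- B's `_emit`: for y in sorted(buckets): for x in sorted(buckets[y]): out.append((x, y))
def pvEmit (buckets : PySem.Dict Int (List Int)) : List (Int × Int) :=
  (PySem.List.sorted buckets.keys (fun y => y)).foldl
    (fun out y =>
      (PySem.List.sorted (buckets.getD y []) (fun x => x)).foldl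
        (fun out x => out ++ [(x, y)]) out)
    []

-- B's main loop: `setdefault(k, []).append(v)` is `modify k [] (· ++ [v])`
def to_horizontal_vertical_walls_alt (walls : List ((Int × Int) × (Int × Int))) : (List (Int × Int)) × (List (Int × Int)) :=
  let p := walls.foldl
    (fun (acc : PySem.Dict Int (List Int) × PySem.Dict Int (List Int)) ab =>
      let a := ab.1
      let b := ab.2
      if a.1 ≠ b.1 then
        (acc.1, acc.2.modify a.2 [] (· ++ [max a.1 b.1]))
      else
        (acc.1.modify (max a.2 b.2) [] (· ++ [a.1]), acc.2))
    (PySem.Dict.empty, PySem.Dict.empty)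
  (pvEmit p.1, pvEmit p.2)

-- ===== PRECONDITION & SPEC =====
def Spec_to_horizontal_vertical_walls (walls : List ((Int × Int) × (Int × Int))) (out : (List (Int × Int)) × (List (Int × Int))) : Prop := out = to_horizontal_vertical_walls_alt walls
instance (walls : List ((Int × Int) × (Int × Int))) (out : (List (Int × Int)) × (List (Int × Int))) : Decidable (Spec_to_horizontal_vertical_walls walls out) := by unfold Spec_to_horizontal_vertical_walls; infer_instance

-- ===== CLAIM (what is proved, stated in full; the proofs are below) =====
def Claim_equal_to_horizontal_vertical_walls : Prop := ∀ (walls : List ((Int × Int) × (Int × Int))), Dom_to_horizontal_vertical_walls walls → Spec_to_horizontal_vertical_walls walls (to_horizontal_vertical_walls walls)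

-- ===== LEMMAS AND PROOFS =====

-- the (injective) lexicographic sort key both programs order coords by: (y, x)
def pvLKey (c : Int × Int) : Lex (Int × Int) := toLex (c.2, c.1)

lemma pvLKey_inj : Function.Injective pvLKey := by
  intro a b h
  cases a; cases b
  simpa [pvLKey, Prod.ext_iff, and_comm] using h

-- the items A collects into `horizontal` resp. `vertical`, in input order
def pvHsel (walls : List ((Int × Int) × (Int × Int))) : List (Int × Int) :=
  (walls.filter (fun w => decide (w.1.1 = w.2.1))).map (fun w => (w.1.1, max w.1.2 w.2.2))
def pvVsel (walls : List ((Int × Int) × (Int × Int))) : List (Int × Int) :=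
  (walls.filter (fun w => !decide (w.1.1 = w.2.1))).map (fun w => (max w.1.1 w.2.1, w.1.2))

-- B's bucketing step, applied to a transformed coord c = (x, y): buckets[y].append(x)
def pvBStep (d : PySem.Dict Int (List Int)) (c : Int × Int) : PySem.Dict Int (List Int) :=
  d.modify c.2 [] (· ++ [c.1])

lemma pvBool_lex (a1 a2 b1 b2 : Int) :
    (decide (a1 < b1) || (!decide (b1 < a1) && decide (a2 < b2))) =
      decide (toLex (a1, a2) < toLex (b1, b2)) := by
  by_cases h1 : a1 < b1 <;> by_cases h2 : b1 < a1 <;> by_cases h3 : a2 < b2 <;>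
    simp [Prod.Lex.toLex_lt_toLex, h1, h2, h3] <;> omega

-- sorted2 with two Int keys is the insertBy-fold over the lexicographic key
lemma pvSorted2_eq {α : Type} (xs : List α) (k1 k2 : α → Int) :
    PySem.List.sorted2 xs k1 k2 false =
      xs.foldl (fun acc x =>
        PySem.List.insertBy (fun a b => decide (toLex (k1 a, k2 a) < toLex (k1 b, k2 b))) x acc) [] := by
  have hc : (fun (a b : α) => decide (k1 a < k1 b) || (!decide (k1 b < k1 a) && decide (k2 a < k2 b)))
      = fun a b => decide (toLex (k1 a, k2 a) < toLex (k1 b, k2 b)) := by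
    funext a b; exact pvBool_lex (k1 a) (k2 a) (k1 b) (k2 b)
  simp only [PySem.List.sorted2, if_neg (by simp : ¬ (false = true))]
  rw [hc]

lemma pvFoldl_insertBy_pairwise {α : Type} (key : α → Lex (Int × Int)) :
    ∀ (xs : List α) (acc : List α),
      acc.Pairwise (fun a b => key a ≤ key b) →
      (xs.foldl (fun acc x => PySem.List.insertBy (fun a b => decide (key a < key b)) x acc) acc).Pairwise
        (fun a b => key a ≤ key b) := by
  intro xs
  induction xs with
  | nil => intro acc h; exact h
  | cons x xs ih =>
      intro acc h
      exact ih _ (PySem.List.insertBy_pairwise_le key x acc h)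

lemma pvSorted2_pairwise {α : Type} (xs : List α) (k1 k2 : α → Int) :
    (PySem.List.sorted2 xs k1 k2 false).Pairwise
      (fun a b => toLex (k1 a, k2 a) ≤ toLex (k1 b, k2 b)) := by
  rw [pvSorted2_eq]
  exact pvFoldl_insertBy_pairwise (fun a => toLex (k1 a, k2 a)) xs [] List.Pairwise.nil

-- A's collection loop splits into the two selections
lemma pvLoopA_eq (walls : List ((Int × Int) × (Int × Int))) :
    ∀ (h v : List (Int × Int)),
      walls.foldl
        (fun (acc : List (Int × Int) × List (Int × Int)) ab =>
          let a := ab.1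
          let b := ab.2
          if a.1 ≠ b.1 then
            (acc.1, acc.2 ++ [(max a.1 b.1, a.2)])
          else
            (acc.1 ++ [(a.1, max a.2 b.2)], acc.2))
        (h, v) = (h ++ pvHsel walls, v ++ pvVsel walls) := by
  induction walls with
  | nil => intro h v; simp [pvHsel, pvVsel]
  | cons w ws ih =>
      intro h v
      by_cases hw : w.1.1 = w.2.1 <;>
        simp [pvHsel, pvVsel, hw] at * <;>
        simp [ih]

-- B's bucketing loop splits into the pvBStep folds over the same two selections
lemma pvLoopB_eq (walls : List ((Int × Int) × (Int × Int))) :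
    ∀ (dh dv : PySem.Dict Int (List Int)),
      walls.foldl
        (fun (acc : PySem.Dict Int (List Int) × PySem.Dict Int (List Int)) ab =>
          let a := ab.1
          let b := ab.2
          if a.1 ≠ b.1 then
            (acc.1, acc.2.modify a.2 [] (· ++ [max a.1 b.1]))
          else
            (acc.1.modify (max a.2 b.2) [] (· ++ [a.1]), acc.2))
        (dh, dv) = ((pvHsel walls).foldl pvBStep dh, (pvVsel walls).foldl pvBStep dv) := by
  induction walls with
  | nil => intro dh dv; simp [pvHsel, pvVsel]
  | cons w ws ih =>
      intro dh dv
      by_cases hw : w.1.1 = w.2.1 <;>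
        simp [pvHsel, pvVsel, pvBStep, hw] at * <;>
        simp [ih]

-- the bucket dict built from a coord list l: keys = distinct y's, bucket y = x's of the y-entries
lemma pvBucket_keys (l : List (Int × Int)) :
    (l.foldl pvBStep PySem.Dict.empty).keys = PySem.Set.ofList (l.map (fun c => c.2)) := by
  have := PySem.Dict.keys_foldl_modify_key l (fun c => c.2) ([] : List Int)
      (fun _ c => (· ++ [c.1])) PySem.Dict.empty
  simpa [pvBStep, PySem.Dict.keys] using this

lemma pvBucket_getD (l : List (Int × Int)) (y : Int) :
    (l.foldl pvBStep PySem.Dict.empty).getD y [] =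
      (l.filter (fun c => c.2 == y)).map (fun c => c.1) := by
  have hmap : l.foldl pvBStep PySem.Dict.empty =
      (l.map (fun c => (c.2, c.1))).foldl (fun d p => d.modify p.1 [] (· ++ [p.2])) PySem.Dict.empty := by
    rw [List.foldl_map]
    rfl
  rw [hmap, PySem.Dict.getD_foldl_modify_append]
  simp [List.filter_map, Function.comp_def, List.map_map]

-- collecting the buckets of a nodup covering key list back gives a permutation of l
lemma pvFlatMap_filter_perm :
    ∀ (ys : List Int) (l : List (Int × Int)), ys.Nodup → (∀ c ∈ l, c.2 ∈ ys) →
      (ys.flatMap (fun y => l.filter (fun c => c.2 == y))).Perm l := by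
  intro ys
  induction ys with
  | nil =>
      intro l _ hcov
      cases l with
      | nil => simp
      | cons c l => exact absurd (hcov c (List.mem_cons_self)) (by simp)
  | cons y ys ih =>
      intro l hnd hcov
      rw [List.flatMap_cons]
      have hrest : ∀ y' ∈ ys, l.filter (fun c => c.2 == y') =
          (l.filter (fun c => !(c.2 == y))).filter (fun c => c.2 == y') := by
        intro y' hy'
        rw [List.filter_filter]
        apply List.filter_congr
        intro c _
        by_cases h : c.2 = y'
        · have hne : ¬ (y' = y) := by
            intro hyy
            exact (List.nodup_cons.mp hnd).1 (hyy ▸ hy')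
          simp [h, hne]
        · simp [h]
      have hfm : ys.flatMap (fun y' => l.filter (fun c => c.2 == y')) =
          ys.flatMap (fun y' => (l.filter (fun c => !(c.2 == y))).filter (fun c => c.2 == y')) :=
        List.flatMap_congr hrest
      rw [hfm]
      have hih := ih (l.filter (fun c => !(c.2 == y))) (List.nodup_cons.mp hnd).2 (by
        intro c hc
        have hm := List.mem_filter.mp hc
        have hne : c.2 ≠ y := by simpa using hm.2
        rcases List.mem_cons.mp (hcov c hm.1) with h | h
        · exact absurd h hne
        · exact h)
      exact (List.Perm.append_left _ hih).trans (List.filter_append_perm _ l)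

-- pvEmit of l's bucket dict IS sorted(l, key=(y, x))
lemma pvEmit_eq (l : List (Int × Int)) :
    pvEmit (l.foldl pvBStep PySem.Dict.empty) =
      PySem.List.sorted2 l (fun item => item.2) (fun item => item.1) := by
  have hkeys := pvBucket_keys l
  -- unfold the two nested append loops into a flatMap
  have hemit : pvEmit (l.foldl pvBStep PySem.Dict.empty) =
      (PySem.List.sorted (PySem.Set.ofList (l.map (fun c => c.2))) (fun y => y)).flatMap
        (fun y => (PySem.List.sorted ((l.filter (fun c => c.2 == y)).map (fun c => c.1))
            (fun x => x)).map (fun x => (x, y))) := by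
    unfold pvEmit
    rw [hkeys]
    simp only [pvBucket_getD, PySem.List.foldl_append_singleton_eq_map,
      PySem.List.foldl_append_eq_flatMap, List.nil_append]
  rw [hemit]
  set ys := PySem.List.sorted (PySem.Set.ofList (l.map (fun c => c.2))) (fun y => y) with hys
  have hysnd : ys.Nodup :=
    (PySem.List.sorted_perm _ _ _).symm.nodup (PySem.Set.nodup_ofList _)
  have hyslt : ys.Pairwise (· < ·) := PySem.List.sorted_ofList_pairwise_lt _
  have hcov : ∀ c ∈ l, c.2 ∈ ys := by
    intro c hc
    rw [hys, PySem.List.mem_sorted, PySem.Set.mem_ofList]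
    exact List.mem_map_of_mem hc
  -- the two sides are equal: both are permutations of l, both sorted by the injective key (y, x)
  apply PySem.List.eq_of_perm_of_pairwise_le_of_injective pvLKey pvLKey_inj
  · -- permutation
    have hpiece : ∀ y : Int,
        ((PySem.List.sorted ((l.filter (fun c => c.2 == y)).map (fun c => c.1))
            (fun x => x)).map (fun x => (x, y))).Perm (l.filter (fun c => c.2 == y)) := by
      intro y
      have h1 := (PySem.List.sorted_perm ((l.filter (fun c => c.2 == y)).map (fun c => c.1))
          (fun x => x) false).map (fun x => (x, y))
      refine h1.trans ?_
      rw [List.map_map]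
      have heq : (l.filter (fun c => c.2 == y)).map ((fun x => (x, y)) ∘ (fun c => c.1)) =
          l.filter (fun c => c.2 == y) := by
        have := List.map_congr_left (l := l.filter (fun c => c.2 == y))
          (f := (fun x => (x, y)) ∘ (fun c => c.1)) (g := id) (by
            intro c hc
            have : c.2 = y := by simpa using (List.mem_filter.mp hc).2
            simp [Function.comp, ← this])
        simpa using this
      rw [heq]
    have hflat : ∀ zs : List Int,
        (zs.flatMap (fun y => (PySem.List.sorted ((l.filter (fun c => c.2 == y)).map
            (fun c => c.1)) (fun x => x)).map (fun x => (x, y)))).Perm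
          (zs.flatMap (fun y => l.filter (fun c => c.2 == y))) := by
      intro zs
      induction zs with
      | nil => simp
      | cons z zs ih =>
          rw [List.flatMap_cons, List.flatMap_cons]
          exact (hpiece z).append ih
    exact ((hflat ys).trans (pvFlatMap_filter_perm ys l hysnd hcov)).trans
      (PySem.List.sorted2_perm l _ _ false).symm
  · -- left side sorted
    rw [List.pairwise_flatMap]
    constructor
    · intro y _
      rw [List.pairwise_map]
      have := PySem.List.sorted_pairwise ((l.filter (fun c => c.2 == y)).map (fun c => c.1))
        (fun x => x)
      exact this.imp (by
        intro a b hab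
        exact Prod.Lex.toLex_le_toLex.mpr (Or.inr ⟨rfl, hab⟩))
    · exact hyslt.imp (by
        intro y y' hyy u hu v hv
        obtain ⟨xu, _, rfl⟩ := List.mem_map.mp hu
        obtain ⟨xv, _, rfl⟩ := List.mem_map.mp hv
        exact Prod.Lex.toLex_le_toLex.mpr (Or.inl hyy))
  · -- right side sorted
    exact (pvSorted2_pairwise l (fun item => item.2) (fun item => item.1)).imp (by
      intro a b h; simpa [pvLKey] using h)

-- ===== VERDICT (by name: the statement is the Claim_ definition above) =====
theorem to_horizontal_vertical_walls_spec : Claim_equal_to_horizontal_vertical_walls := by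
  intro walls _
  unfold Spec_to_horizontal_vertical_walls to_horizontal_vertical_walls to_horizontal_vertical_walls_alt
  rw [pvLoopA_eq walls [] [], pvLoopB_eq walls PySem.Dict.empty PySem.Dict.empty]
  simp only [List.nil_append]
  exact Prod.ext (pvEmit_eq (pvHsel walls)).symm (pvEmit_eq (pvVsel walls)).symm
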